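-- pv_equiv track=rewrite | github.com/whyhow-ai/knowledge-graph-studio | src/whyhow_api/utilities/common.py | compress_triples
-- ===== SOURCE A (Python) =====
-- from collections import defaultdict
-- from typing import Any, DefaultDict, Dict, List, Set, Tuple
--
-- def compress_triples(triples: List[Tuple[str, str, str]]) -> str:
--     """
--     Compress semantic triples.
--
--     Compress a list of triples into a more compact string format by
--     aggregating similar relationships under a single head entity.
--
--     Parameters
--     ----------
--     triples : List[Tuple[str, str, str]]
--         A list of triples in the format (head, relation, tail).
--
--     Returns
--     -------
--     str
--         A compressed string representation where multiple tails are grouped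
--         under the same head and relation in a single line,
--         sorted alphabetically.
--
--     Example
--     -------
--     triples = [
--         ('Jerry', 'friends with', 'Kramer'),
--         ('Jerry', 'friends with', 'Elaine'),
--         ('Jerry', 'friends with', 'George')
--     ]
--     compressed_output = compress_triples(triples)
--     Outputs: "Jerry friends with Elaine, George, Kramer"
--     """
--     structured_data: DefaultDict[Any, DefaultDict[Any, Set[str]]] = (
--         defaultdict(lambda: defaultdict(set))
--     )  # Use sets to automatically drop duplicates
--
--     for head, relation, tail in triples:
--         # Normalize the relation string
--         relation = relation.replace("_", " ").lower()
--         # Add tail to the set associated with the (head, relation) key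
--         structured_data[head][relation].add(tail)
--
--     # Building the output string
--     output = []
--     for head, relations in sorted(structured_data.items()):
--         for relation, tails in sorted(relations.items()):
--             output.append(f"{head} {relation} {', '.join(sorted(tails))}")
--     return "\n".join(output)
-- ===== SOURCE B (Python) =====
-- from itertools import groupby
-- from typing import List, Tuple
--
--
-- def compress_triples(triples: List[Tuple[str, str, str]]) -> str:
--     flat = sorted(
--         ((h, r.replace("_", " ").lower(), t) for h, r, t in triples),
--         key=lambda x: (x[0], x[1]),
--     )
--     lines = []
--     for (head, rel), grp in groupby(flat, key=lambda x: (x[0], x[1])):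
--         tails = ", ".join(sorted({t for _, _, t in grp}))
--         lines.append(f"{head} {rel} {tails}")
--     return "\n".join(lines)
-- ===== Notes on version B (the rewrite author's own statement) =====
-- stated objective: alternative
-- what changed: Replaces A's nested defaultdict aggregation followed by three levels of sorting with a sort-first strategy: normalize relations, sort the flat triple list once by (head, relation), then itertools.groupby adjacent runs to emit each line.
import Mathlib
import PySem

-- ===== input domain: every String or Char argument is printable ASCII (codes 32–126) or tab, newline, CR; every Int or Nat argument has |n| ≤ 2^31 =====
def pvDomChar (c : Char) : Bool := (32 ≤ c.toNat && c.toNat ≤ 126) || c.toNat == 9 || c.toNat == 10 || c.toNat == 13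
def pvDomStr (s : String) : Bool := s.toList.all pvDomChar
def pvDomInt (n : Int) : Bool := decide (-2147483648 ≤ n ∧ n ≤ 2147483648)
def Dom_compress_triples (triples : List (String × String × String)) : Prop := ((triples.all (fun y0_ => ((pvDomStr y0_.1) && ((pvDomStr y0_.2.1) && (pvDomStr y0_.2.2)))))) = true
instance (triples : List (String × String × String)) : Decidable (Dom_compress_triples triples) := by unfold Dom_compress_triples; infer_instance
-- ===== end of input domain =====

-- B replaces A's nested-defaultdict aggregation by a sort-once-then-groupby-adjacent pass
-- (alternative decomposition, same asymptotic cost); return values proved equal on all inputs.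

-- ===== PORT A =====
-- Python's sorted(...) over dict items compares (key, value) tuples; dict keys are
-- distinct, so the comparison never reaches the values: sorting by the key is exact here.
def compress_triples (triples : List (String × String × String)) : String :=
  let structured : PySem.Dict String (PySem.Dict String (PySem.Set String)) :=
    triples.foldl (fun d x =>
      let rel := PySem.Str.lower (PySem.Str.replace x.2.1 "_" " ")
      d.modify x.1 PySem.Dict.empty (fun inner =>
        inner.modify rel PySem.Set.empty (fun s => PySem.Set.add s x.2.2))) PySem.Dict.empty
  let output : List String :=
    (PySem.List.sorted structured.items (fun p => p.1) false).foldl (fun out hp =>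
      (PySem.List.sorted hp.2.items (fun p => p.1) false).foldl (fun out rp =>
        out ++ [hp.1 ++ " " ++ rp.1 ++ " " ++
          PySem.Str.join ", " (PySem.List.sorted rp.2 (fun t => t) false)]) out) []
  PySem.Str.join "\n" output

-- ===== PORT B =====
-- itertools.groupby over a list: consecutive runs of equal keys.
def pvGroupBy : List (String × String × String) → List ((String × String) × List String)
  | [] => []
  | x :: xs =>
    ((x.1, x.2.1), x.2.2 :: (xs.takeWhile (fun y => (y.1, y.2.1) == (x.1, x.2.1))).map (fun y => y.2.2)) ::
      pvGroupBy (xs.dropWhile (fun y => (y.1, y.2.1) == (x.1, x.2.1)))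
  termination_by L => L.length
  decreasing_by exact Nat.lt_succ_of_le (List.length_dropWhile_le _ _)

def compress_triples_alt (triples : List (String × String × String)) : String :=
  let flat := PySem.List.sorted2
      (triples.map (fun y => (y.1, PySem.Str.lower (PySem.Str.replace y.2.1 "_" " "), y.2.2)))
      (fun x => x.1) (fun x => x.2.1) false
  let lines := (pvGroupBy flat).map (fun g =>
      g.1.1 ++ " " ++ g.1.2 ++ " " ++
        PySem.Str.join ", " (PySem.List.sorted (PySem.Set.ofList g.2) (fun t => t) false))
  PySem.Str.join "\n" lines

-- ===== PRECONDITION & SPEC =====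
def Spec_compress_triples (triples : List (String × String × String)) (out : String) : Prop := out = compress_triples_alt triples
instance (triples : List (String × String × String)) (out : String) : Decidable (Spec_compress_triples triples out) := by unfold Spec_compress_triples; infer_instance

-- ===== CLAIM (what is proved, stated in full; the proofs are below) =====
def Claim_equal_compress_triples : Prop := ∀ (triples : List (String × String × String)), Dom_compress_triples triples → Spec_compress_triples triples (compress_triples triples)

-- ===== LEMMAS AND PROOFS =====

-- Shared abbreviations for the proofs.
def pvNorm (y : String × String × String) : String × String × String :=
  (y.1, PySem.Str.lower (PySem.Str.replace y.2.1 "_" " "), y.2.2)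

def pvLexKey (y : String × String × String) : Lex (String × String) := toLex (y.1, y.2.1)

def pvInnerStep (inner : PySem.Dict String (PySem.Set String)) (y : String × String × String) :
    PySem.Dict String (PySem.Set String) :=
  inner.modify y.2.1 PySem.Set.empty (fun s => PySem.Set.add s y.2.2)

def pvOuterStep (d : PySem.Dict String (PySem.Dict String (PySem.Set String)))
    (y : String × String × String) : PySem.Dict String (PySem.Dict String (PySem.Set String)) :=
  d.modify y.1 PySem.Dict.empty (fun inner => pvInnerStep inner y)

-- sorted tails of (head, rel) = k in the list m, as A computes them
def pvTails (m : List (String × String × String)) (k : String × String) : List String :=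
  PySem.List.sorted
    (PySem.Set.ofList ((m.filter (fun y => (y.1, y.2.1) == k)).map (fun y => y.2.2)))
    (fun t => t) false

def pvLine (m : List (String × String × String)) (k : String × String) : String :=
  k.1 ++ " " ++ k.2 ++ " " ++ PySem.Str.join ", " (pvTails m k)

-- A's key sequence: sorted heads, then sorted relations per head
def pvKA (m : List (String × String × String)) : List (String × String) :=
  (PySem.List.sorted (PySem.Set.ofList (m.map (fun y => y.1))) (fun h => h) false).flatMap
    (fun h =>
      (PySem.List.sorted
        (PySem.Set.ofList ((m.filter (fun y => y.1 == h)).map (fun y => y.2.1))) (fun r => r) false).map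
        (fun r => (h, r)))

-- generic helpers ---------------------------------------------------------

theorem pv_nodup_of_pairwise_lt {α : Type} {f : α → Lex (String × String)} (xs : List α)
    (h : xs.Pairwise (fun a b => f a < f b)) : xs.Nodup := by
  refine h.imp ?_
  intro a b hlt heq
  subst heq
  exact lt_irrefl _ hlt

theorem pv_sorted_ofList_eq_of_perm (xs ys : List String) (hp : xs.Perm ys) :
    PySem.List.sorted (PySem.Set.ofList xs) (fun t => t) false
      = PySem.List.sorted (PySem.Set.ofList ys) (fun t => t) false := by
  apply PySem.List.sorted_eq_of_perm_of_pairwise_lt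
  · refine (PySem.List.sorted_perm _ _ _).trans ?_
    rw [List.perm_ext_iff_of_nodup (PySem.Set.nodup_ofList ys) (PySem.Set.nodup_ofList xs)]
    intro a
    simp [PySem.Set.mem_ofList, hp.mem_iff]
  · exact PySem.List.sorted_ofList_pairwise_lt ys

theorem pv_sorted_items_eq {ν : Type} (d : PySem.Dict String ν) (hnd : d.keys.Nodup) (dflt : ν) :
    PySem.List.sorted d.items (fun p => p.1) false
      = (PySem.List.sorted d.keys (fun k => k) false).map (fun k => (k, d.getD k dflt)) := by
  rw [PySem.Dict.items_eq_map_keys d hnd dflt]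
  apply PySem.List.sorted_eq_of_perm_of_pairwise_lt
  · exact (PySem.List.sorted_perm _ _ _).map _
  · rw [List.pairwise_map]
    have hle := PySem.List.sorted_pairwise d.keys (fun k => k)
    have hnd' : (PySem.List.sorted d.keys (fun k => k) false).Nodup :=
      ((PySem.List.sorted_perm d.keys (fun k => k) false).nodup_iff).mpr hnd
    exact ((hle.and hnd').imp (fun h => lt_of_le_of_ne h.1 h.2))

theorem pv_outer_getD (m : List (String × String × String))
    (d : PySem.Dict String (PySem.Dict String (PySem.Set String))) (h : String) :
    (m.foldl pvOuterStep d).getD h PySem.Dict.empty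
      = (m.filter (fun y => y.1 == h)).foldl pvInnerStep (d.getD h PySem.Dict.empty) := by
  induction m generalizing d with
  | nil => rfl
  | cons y ys ih =>
    simp only [List.foldl_cons, List.filter_cons]
    by_cases hy : y.1 = h
    · simp only [hy, beq_self_eq_true, ih]
      rw [pvOuterStep, PySem.Dict.getD_modify]
      simp [hy]
    · have : (y.1 == h) = false := by simp [hy]
      simp only [this, ih]
      rw [pvOuterStep, PySem.Dict.getD_modify]
      simp [Ne.symm hy]

theorem pv_inner_getD (m : List (String × String × String))
    (d : PySem.Dict String (PySem.Set String)) (r : String) :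
    (m.foldl pvInnerStep d).getD r PySem.Set.empty
      = (m.filter (fun y => y.2.1 == r)).foldl (fun s y => PySem.Set.add s y.2.2)
          (d.getD r PySem.Set.empty) := by
  induction m generalizing d with
  | nil => rfl
  | cons y ys ih =>
    simp only [List.foldl_cons, List.filter_cons]
    by_cases hy : y.2.1 = r
    · simp only [hy, beq_self_eq_true, ih]
      rw [pvInnerStep, PySem.Dict.getD_modify]
      simp [hy]
    · have : (y.2.1 == r) = false := by simp [hy]
      simp only [this, ih]
      rw [pvInnerStep, PySem.Dict.getD_modify]
      simp [Ne.symm hy]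

theorem pv_sorted2_eq_sorted_lex (xs : List (String × String × String)) :
    PySem.List.sorted2 xs (fun x => x.1) (fun x => x.2.1) false
      = PySem.List.sorted xs pvLexKey false := by
  show List.foldl _ [] xs = List.foldl _ [] xs
  congr 1
  funext acc x
  congr 1
  funext a b
  show (decide (a.1 < b.1) || !decide (b.1 < a.1) && decide (a.2.1 < b.2.1))
      = decide (pvLexKey a < pvLexKey b)
  have : (pvLexKey a < pvLexKey b) ↔ (a.1 < b.1 ∨ a.1 = b.1 ∧ a.2.1 < b.2.1) := by
    rw [pvLexKey, pvLexKey, Prod.Lex.lt_iff]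
    exact Iff.rfl
  rcases lt_trichotomy a.1 b.1 with h | h | h
  · simp [this, h, asymm h]
  · simp [this, h]
  · simp [this, h, asymm h, ne_of_gt h]

theorem pv_dropWhile_gt (k0 : String × String) (xs : List (String × String × String))
    (hall : ∀ y ∈ xs, toLex k0 ≤ pvLexKey y)
    (hp : xs.Pairwise (fun a b => pvLexKey a ≤ pvLexKey b)) :
    ∀ y ∈ xs.dropWhile (fun y => (y.1, y.2.1) == k0), toLex k0 < pvLexKey y := by
  induction xs with
  | nil => simp
  | cons z zs ih =>
    rcases List.pairwise_cons.mp hp with ⟨hz, hzs⟩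
    by_cases hk : (z.1, z.2.1) = k0
    · rw [List.dropWhile_cons_of_pos (by simp [hk])]
      exact ih (fun y hy => hall y (List.mem_cons_of_mem _ hy)) hzs
    · rw [List.dropWhile_cons_of_neg (by simp [hk])]
      intro y hy
      have hzlt : toLex k0 < pvLexKey z := by
        refine lt_of_le_of_ne (hall z (List.mem_cons_self)) ?_
        intro he
        exact hk (toLex.injective he).symm
      rcases List.mem_cons.mp hy with rfl | hy'
      · exact hzlt
      · exact lt_of_lt_of_le hzlt (hz y hy')

theorem pv_filter_head (x : String × String × String) (xs : List (String × String × String))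
    (hall : ∀ y ∈ xs, toLex (x.1, x.2.1) ≤ pvLexKey y)
    (hp : xs.Pairwise (fun a b => pvLexKey a ≤ pvLexKey b)) :
    (x :: xs).filter (fun y => (y.1, y.2.1) == (x.1, x.2.1))
      = x :: xs.takeWhile (fun y => (y.1, y.2.1) == (x.1, x.2.1)) := by
  rw [List.filter_cons_of_pos (by simp)]
  congr 1
  conv_lhs => rw [← List.takeWhile_append_dropWhile (p := fun y => (y.1, y.2.1) == (x.1, x.2.1)) (l := xs)]
  rw [List.filter_append]
  rw [List.filter_eq_self.mpr (fun y hy => List.mem_takeWhile_imp (p := fun y : String × String × String => (y.1, y.2.1) == (x.1, x.2.1)) hy)]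
  rw [List.filter_eq_nil_iff.mpr, List.append_nil]
  intro y hy
  have := pv_dropWhile_gt (x.1, x.2.1) xs hall hp y hy
  simp only [beq_iff_eq]
  intro he
  rw [pvLexKey, he] at this
  exact lt_irrefl _ this

theorem pv_filter_later (x : String × String × String) (xs : List (String × String × String))
    (k : String × String) (hk : toLex (x.1, x.2.1) < toLex k) :
    (x :: xs).filter (fun y => (y.1, y.2.1) == k)
      = (xs.dropWhile (fun y => (y.1, y.2.1) == (x.1, x.2.1))).filter (fun y => (y.1, y.2.1) == k) := by
  have hne : (x.1, x.2.1) ≠ k := fun he => lt_irrefl _ (he ▸ hk)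
  rw [List.filter_cons_of_neg (by simp [hne])]
  conv_lhs => rw [← List.takeWhile_append_dropWhile (p := fun y => (y.1, y.2.1) == (x.1, x.2.1)) (l := xs)]
  rw [List.filter_append, List.filter_eq_nil_iff.mpr, List.nil_append]
  intro y hy
  have := List.mem_takeWhile_imp hy
  simp only [beq_iff_eq] at this ⊢
  rw [this]
  exact hne

theorem pv_groupBy_spec (L : List (String × String × String))
    (hs : L.Pairwise (fun a b => pvLexKey a ≤ pvLexKey b)) :
    (∀ g ∈ pvGroupBy L, g.2 = (L.filter (fun y => (y.1, y.2.1) == g.1)).map (fun y => y.2.2))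
    ∧ ((pvGroupBy L).map Prod.fst).Pairwise (fun k k' => toLex k < toLex k')
    ∧ (∀ k, k ∈ (pvGroupBy L).map Prod.fst ↔ ∃ y ∈ L, (y.1, y.2.1) = k) := by
  induction hn : L.length using Nat.strong_induction_on generalizing L with
  | _ n ih =>
  cases L with
  | nil => simp [pvGroupBy]
  | cons x xs =>
    rcases List.pairwise_cons.mp hs with ⟨hx, hxs⟩
    have hx' : ∀ y ∈ xs, toLex (x.1, x.2.1) ≤ pvLexKey y := hx
    set p : (String × String × String) → Bool := fun y => (y.1, y.2.1) == (x.1, x.2.1) with hp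
    have hlen : (xs.dropWhile p).length < n := by
      subst hn; exact Nat.lt_succ_of_le (List.length_dropWhile_le _ _)
    have hsd : (xs.dropWhile p).Pairwise (fun a b => pvLexKey a ≤ pvLexKey b) :=
      hxs.sublist (List.dropWhile_sublist p)
    obtain ⟨ih1, ih2, ih3⟩ := ih _ hlen (xs.dropWhile p) hsd rfl
    have hgt : ∀ y ∈ xs.dropWhile p, toLex (x.1, x.2.1) < pvLexKey y :=
      pv_dropWhile_gt _ xs hx' hxs
    have hkeygt : ∀ k ∈ (pvGroupBy (xs.dropWhile p)).map Prod.fst, toLex (x.1, x.2.1) < toLex k := by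
      intro k hk
      rcases (ih3 k).mp hk with ⟨y, hy, rfl⟩
      exact hgt y hy
    rw [pvGroupBy]
    refine ⟨?_, ?_, ?_⟩
    · intro g hg
      rcases List.mem_cons.mp hg with rfl | hg'
      · simp only
        rw [pv_filter_head x xs hx' hxs, List.map_cons]
      · rw [ih1 g hg', pv_filter_later x xs g.1 ?_]
        exact hkeygt g.1 (List.mem_map_of_mem hg')
    · rw [List.map_cons, List.pairwise_cons]
      exact ⟨hkeygt, ih2⟩
    · intro k
      rw [List.map_cons, List.mem_cons]
      constructor
      · rintro (rfl | hk)
        · exact ⟨x, List.mem_cons_self, rfl⟩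
        · rcases (ih3 k).mp hk with ⟨y, hy, rfl⟩
          exact ⟨y, List.mem_cons_of_mem _ ((List.dropWhile_sublist p).mem hy), rfl⟩
      · rintro ⟨y, hy, rfl⟩
        rcases List.mem_cons.mp hy with rfl | hy'
        · exact Or.inl rfl
        · conv at hy' => rw [← List.takeWhile_append_dropWhile (p := p) (l := xs)]
          rcases List.mem_append.mp hy' with h1 | h2
          · have := List.mem_takeWhile_imp h1
            simp only [hp, beq_iff_eq] at this
            exact Or.inl this
          · exact Or.inr ((ih3 _).mpr ⟨y, h2, rfl⟩)

theorem pv_flatMap_pairwise (hs : List String) (f : String → List String)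
    (h1 : hs.Pairwise (· < ·)) (h2 : ∀ h, (f h).Pairwise (· < ·)) :
    (hs.flatMap (fun h => (f h).map (fun r => (h, r)))).Pairwise
      (fun k k' => toLex k < toLex k') := by
  induction hs with
  | nil => simp
  | cons h t ih =>
    rcases List.pairwise_cons.mp h1 with ⟨hh, ht⟩
    rw [List.flatMap_cons, List.pairwise_append]
    refine ⟨?_, ih ht, ?_⟩
    · rw [List.pairwise_map]
      exact (h2 h).imp (fun {a b} hab => by
        rw [Prod.Lex.lt_iff]; exact Or.inr ⟨rfl, hab⟩)
    · rintro a ha b hb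
      rcases List.mem_map.mp ha with ⟨r, _, rfl⟩
      rcases List.mem_flatMap.mp hb with ⟨h', hh', hb'⟩
      rcases List.mem_map.mp hb' with ⟨r', _, rfl⟩
      rw [Prod.Lex.lt_iff]
      exact Or.inl (hh h' hh')

theorem pv_KA_pairwise (m : List (String × String × String)) :
    (pvKA m).Pairwise (fun k k' => toLex k < toLex k') := by
  apply pv_flatMap_pairwise
  · exact PySem.List.sorted_ofList_pairwise_lt _
  · intro h; exact PySem.List.sorted_ofList_pairwise_lt _

theorem pv_KA_mem (m : List (String × String × String)) (k : String × String) :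
    k ∈ pvKA m ↔ ∃ y ∈ m, (y.1, y.2.1) = k := by
  rw [pvKA, List.mem_flatMap]
  constructor
  · rintro ⟨h, hh, hk⟩
    rcases List.mem_map.mp hk with ⟨r, hr, rfl⟩
    rw [PySem.List.mem_sorted, PySem.Set.mem_ofList, List.mem_map] at hr
    rcases hr with ⟨y, hy, rfl⟩
    rcases List.mem_filter.mp hy with ⟨hym, hy1⟩
    exact ⟨y, hym, by rw [beq_iff_eq] at hy1; rw [hy1]⟩
  · rintro ⟨y, hy, rfl⟩
    refine ⟨y.1, ?_, ?_⟩
    · rw [PySem.List.mem_sorted, PySem.Set.mem_ofList, List.mem_map]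
      exact ⟨y, hy, rfl⟩
    · rw [List.mem_map]
      refine ⟨y.2.1, ?_, rfl⟩
      rw [PySem.List.mem_sorted, PySem.Set.mem_ofList, List.mem_map]
      exact ⟨y, List.mem_filter.mpr ⟨hy, by simp⟩, rfl⟩

theorem pv_A_eq (triples : List (String × String × String)) :
    compress_triples triples
      = PySem.Str.join "\n" ((pvKA (triples.map pvNorm)).map (pvLine (triples.map pvNorm))) := by
  set m := triples.map pvNorm with hm
  have hfold : triples.foldl (fun d x =>
      d.modify x.1 PySem.Dict.empty (fun inner =>
        inner.modify (PySem.Str.lower (PySem.Str.replace x.2.1 "_" " ")) PySem.Set.empty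
          (fun s => PySem.Set.add s x.2.2))) PySem.Dict.empty
      = m.foldl pvOuterStep PySem.Dict.empty := by
    rw [hm, List.foldl_map]
    rfl
  set D := m.foldl pvOuterStep PySem.Dict.empty with hD
  -- keys of D
  have hKeq : D.keys = PySem.Set.ofList (m.map (fun y => y.1)) := by
    have := PySem.Dict.keys_foldl_modify_key m (fun y => y.1) PySem.Dict.empty
      (fun _ x v => pvInnerStep v x) PySem.Dict.empty
    simpa using this
  have hKnd : D.keys.Nodup := by
    rw [hKeq]; exact PySem.Set.nodup_ofList _
  -- inner dict at h
  have hInner : ∀ h, D.getD h PySem.Dict.empty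
      = (m.filter (fun y => y.1 == h)).foldl pvInnerStep PySem.Dict.empty := by
    intro h
    rw [hD, pv_outer_getD]
    rfl
  have hIKeq : ∀ h, ((m.filter (fun y => y.1 == h)).foldl pvInnerStep PySem.Dict.empty).keys
      = PySem.Set.ofList ((m.filter (fun y => y.1 == h)).map (fun y => y.2.1)) := by
    intro h
    have := PySem.Dict.keys_foldl_modify_key (m.filter (fun y => y.1 == h)) (fun y => y.2.1)
      PySem.Set.empty (fun _ x v => PySem.Set.add v x.2.2) PySem.Dict.empty
    simpa using this
  have hIKnd : ∀ h, ((m.filter (fun y => y.1 == h)).foldl pvInnerStep PySem.Dict.empty).keys.Nodup := by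
    intro h; rw [hIKeq]; exact PySem.Set.nodup_ofList _
  have hIget : ∀ h r, ((m.filter (fun y => y.1 == h)).foldl pvInnerStep PySem.Dict.empty).getD r PySem.Set.empty
      = PySem.Set.ofList (((m.filter (fun y => y.1 == h)).filter (fun y => y.2.1 == r)).map (fun y => y.2.2)) := by
    intro h r
    rw [pv_inner_getD]
    rw [← PySem.Set.update_map_eq_foldl_add]
    rfl
  have hfold1 : ∀ {α : Type} (g : α → String) (lst : List α) (out : List String),
      List.foldl (fun out rp => out ++ [g rp]) out lst = out ++ lst.map g := by
    intro α g lst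
    induction lst with
    | nil => simp
    | cons a as ih => intro out; simp [ih]
  show PySem.Str.join "\n" _ = _
  rw [hfold]
  rw [pv_sorted_items_eq D hKnd PySem.Dict.empty]
  have hstep : (fun (out : List String) (hp : String × PySem.Dict String (PySem.Set String)) =>
      List.foldl (fun out rp =>
        out ++ [hp.1 ++ " " ++ rp.1 ++ " " ++
          PySem.Str.join ", " (PySem.List.sorted rp.2 (fun t => t) false)]) out
        (PySem.List.sorted hp.2.items (fun p => p.1) false))
      = (fun out hp => out ++ (PySem.List.sorted hp.2.items (fun p => p.1) false).map
          (fun rp => hp.1 ++ " " ++ rp.1 ++ " " ++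
            PySem.Str.join ", " (PySem.List.sorted rp.2 (fun t => t) false))) := by
    funext out hp
    exact hfold1 _ _ _
  rw [hstep, PySem.List.foldl_append_eq_flatMap, List.nil_append, List.flatMap_map]
  rw [hKeq]
  congr 1
  rw [pvKA, List.map_flatMap]
  refine List.flatMap_congr ?_
  intro h _
  rw [hInner h]
  rw [pv_sorted_items_eq _ (hIKnd h) PySem.Set.empty, List.map_map, List.map_map, hIKeq h]
  apply List.map_congr_left
  intro r _
  show _ = pvLine m (h, r)
  rw [pvLine, pvTails]
  simp only [Function.comp_apply]
  have hfe : (m.filter (fun y => y.1 == h)).filter (fun y => y.2.1 == r)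
      = m.filter (fun y => (y.1, y.2.1) == (h, r)) := by
    rw [List.filter_filter]
    exact List.filter_congr (fun y _ => by rw [Bool.and_comm]; rfl)
  rw [hIget h r, hfe]

-- the main combination ------------------------------------------------------

theorem pv_main (triples : List (String × String × String)) :
    compress_triples triples = compress_triples_alt triples := by
  rw [pv_A_eq]
  set m := triples.map pvNorm with hm
  show _ = PySem.Str.join "\n" ((pvGroupBy (PySem.List.sorted2 m (fun x => x.1) (fun x => x.2.1) false)).map
      (fun g => g.1.1 ++ " " ++ g.1.2 ++ " " ++
        PySem.Str.join ", " (PySem.List.sorted (PySem.Set.ofList g.2) (fun t => t) false)))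
  rw [pv_sorted2_eq_sorted_lex m]
  set L := PySem.List.sorted m pvLexKey false with hL
  have hper : L.Perm m := PySem.List.sorted_perm m pvLexKey false
  have hsorted : L.Pairwise (fun a b => pvLexKey a ≤ pvLexKey b) :=
    PySem.List.sorted_pairwise m pvLexKey
  obtain ⟨g1, g2, g3⟩ := pv_groupBy_spec L hsorted
  congr 1
  have hline : ∀ g ∈ pvGroupBy L,
      (g.1.1 ++ " " ++ g.1.2 ++ " " ++
        PySem.Str.join ", " (PySem.List.sorted (PySem.Set.ofList g.2) (fun t => t) false))
      = pvLine m g.1 := by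
    intro g hg
    rw [g1 g hg, pvLine, pvTails]
    congr 2
    exact pv_sorted_ofList_eq_of_perm _ _ ((hper.filter _).map _)
  rw [List.map_congr_left hline]
  have hmapfst : (pvGroupBy L).map (fun g => pvLine m g.1)
      = ((pvGroupBy L).map Prod.fst).map (pvLine m) := by
    rw [List.map_map]; rfl
  rw [hmapfst]
  congr 1
  -- KA = KB : both strictly lex-sorted enumerations of the same key set
  have hKAnd : (pvKA m).Nodup := pv_nodup_of_pairwise_lt (f := toLex) _ (pv_KA_pairwise m)
  have hKBnd : ((pvGroupBy L).map Prod.fst).Nodup := pv_nodup_of_pairwise_lt (f := toLex) _ g2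
  have hmem : ∀ k, k ∈ pvKA m ↔ k ∈ (pvGroupBy L).map Prod.fst := by
    intro k
    rw [pv_KA_mem, g3 k]
    constructor
    · rintro ⟨y, hy, rfl⟩; exact ⟨y, hper.mem_iff.mpr hy, rfl⟩
    · rintro ⟨y, hy, rfl⟩; exact ⟨y, hper.mem_iff.mp hy, rfl⟩
  have hperm : (pvKA m).Perm ((pvGroupBy L).map Prod.fst) :=
    (List.perm_ext_iff_of_nodup hKAnd hKBnd).mpr hmem
  exact List.Perm.eq_of_pairwise
    (fun a b _ _ h1 h2 => absurd h2 (lt_asymm h1)) (pv_KA_pairwise m) g2 hperm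



-- ===== VERDICT (by name: the statement is the Claim_ definition above) =====
theorem compress_triples_spec : Claim_equal_compress_triples := by
  intro triples _
  unfold Spec_compress_triples
  exact pv_main triples
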